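-- pv_equiv track=rewrite | github.com/jiazheng-wang-yes/midi-sync-project | midi2lists.py | filter_tuples
-- ===== SOURCE A (Python) =====
-- def filter_tuples(tuples_list):
--     filtered_dict = {}
--
--     for t in tuples_list:
--         if t[1] not in filtered_dict:
--             filtered_dict[t[1]] = t[0]
--         else:
--             filtered_dict[t[1]] = max(filtered_dict[t[1]], t[0])
--     tuples_list = [(value, key) for key, value in filtered_dict.items()]
--
--
--     return tuples_list
-- ===== SOURCE B (Python) =====
-- def filter_tuples(tuples_list):
--     keys = []
--     for _, k in tuples_list:
--         if k not in keys:
--             keys.append(k)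
--     return [(max(x for x, y in tuples_list if y == k), k) for k in keys]
-- ===== Notes on version B (the rewrite author's own statement) =====
-- stated objective: alternative
-- what changed: Drops A's dict with an in-loop running max entirely: B first collects the distinct keys in first-appearance order, then for each key scans the whole list and takes the max of the matching first components (O(n*k) two-stage scan instead of O(n) dict build).
import Mathlib
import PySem

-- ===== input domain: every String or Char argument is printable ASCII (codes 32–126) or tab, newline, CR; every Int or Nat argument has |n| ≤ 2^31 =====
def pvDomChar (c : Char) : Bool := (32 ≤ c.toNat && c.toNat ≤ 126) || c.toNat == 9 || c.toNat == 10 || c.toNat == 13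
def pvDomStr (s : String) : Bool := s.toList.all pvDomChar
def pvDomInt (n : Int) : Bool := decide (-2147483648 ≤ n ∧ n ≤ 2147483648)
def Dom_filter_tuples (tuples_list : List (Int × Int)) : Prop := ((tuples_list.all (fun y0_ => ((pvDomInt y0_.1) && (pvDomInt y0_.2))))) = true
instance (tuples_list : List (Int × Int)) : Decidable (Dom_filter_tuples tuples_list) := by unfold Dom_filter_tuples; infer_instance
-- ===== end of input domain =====

-- B drops A's dict with its in-loop running max: it dedups the keys in first-appearance
-- order, then for each key filters the whole list and takes the max (alternative, not faster).

-- ===== PORT A =====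
-- literal port: dict loop with a running max per key, then items reversed into (value, key)
def filter_tuples (tuples_list : List (Int × Int)) : List (Int × Int) :=
  (tuples_list.foldl
      (fun d t =>
        if d.contains t.2 = false then
          d.insert t.2 t.1
        else
          -- Python's filtered_dict[t[1]] cannot raise here (key present), so getD is exact
          d.insert t.2 (max (d.getD t.2 0) t.1))
      (PySem.Dict.empty : PySem.Dict Int Int)).items.map (fun kv => (kv.2, kv.1))

-- ===== PORT B =====
-- literal port of Source B: the 'if k not in keys then append' loop is exactly PySem.Set.add;
-- max(...) over the nonempty filtered values is PySem.List.maxD (default 0 unreachable)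
def filter_tuples_alt (tuples_list : List (Int × Int)) : List (Int × Int) :=
  let keys : PySem.Set Int :=
    tuples_list.foldl (fun s t => PySem.Set.add s t.2) PySem.Set.empty
  keys.map (fun k =>
    (PySem.List.maxD ((tuples_list.filter (fun t => t.2 == k)).map Prod.fst) (fun v => v) 0, k))

-- ===== PRECONDITION & SPEC =====
def Spec_filter_tuples (tuples_list : List (Int × Int)) (out : List (Int × Int)) : Prop := out = filter_tuples_alt tuples_list
instance (tuples_list : List (Int × Int)) (out : List (Int × Int)) : Decidable (Spec_filter_tuples tuples_list out) := by unfold Spec_filter_tuples; infer_instance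

-- ===== CLAIM (what is proved, stated in full; the proofs are below) =====
def Claim_equal_filter_tuples : Prop := ∀ (tuples_list : List (Int × Int)), Dom_filter_tuples tuples_list → Spec_filter_tuples tuples_list (filter_tuples tuples_list)

-- ===== LEMMAS AND PROOFS =====

-- A's loop step as a single insert (both branches insert at t.2)
theorem stepA_eq :
    (fun (d : PySem.Dict Int Int) (t : Int × Int) =>
      if d.contains t.2 = false then d.insert t.2 t.1
      else d.insert t.2 (max (d.getD t.2 0) t.1)) =
    (fun d t => d.insert t.2 (if d.contains t.2 = false then t.1 else max (d.getD t.2 0) t.1)) := by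
  funext d t
  split <;> rfl

-- running max of an optional seed followed by a list of values
def omaxFrom (o : Option Int) (vs : List Int) : Int :=
  match o, vs with
  | some m, _ => vs.foldl max m
  | none, v :: vs' => vs'.foldl max v
  | none, [] => 0

-- invariant of A's loop: its entry at k is the max over the seed and all filtered values
theorem loopA_getD (l : List (Int × Int)) (dA : PySem.Dict Int Int) (k : Int) :
    ((l.foldl (fun d t =>
        if d.contains t.2 = false then d.insert t.2 t.1
        else d.insert t.2 (max (d.getD t.2 0) t.1)) dA).getD k 0) =
      omaxFrom (if dA.contains k then some (dA.getD k 0) else none)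
        ((l.filter (fun t => t.2 == k)).map Prod.fst) := by
  induction l generalizing dA with
  | nil =>
    simp only [List.foldl_nil, List.filter_nil, List.map_nil]
    by_cases h : dA.contains k = true
    · simp [omaxFrom, h]
    · rw [if_neg h, PySem.Dict.getD_of_not_contains _ _ (by simpa using h)]
      rfl
  | cons t l ih =>
    simp only [List.foldl_cons]
    by_cases hk : t.2 = k
    · have hfilter : (t :: l).filter (fun t => t.2 == k) = t :: l.filter (fun t => t.2 == k) := by
        simp [hk]
      rw [hfilter]
      by_cases hc : dA.contains t.2 = false
      · rw [if_pos hc, ih]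
        have h1 : (dA.insert t.2 t.1).contains k = true := by
          simp [hk]
        have h2 : (dA.insert t.2 t.1).getD k 0 = t.1 := by
          rw [PySem.Dict.getD_insert]; simp [hk]
        rw [if_pos h1, h2]
        have hcA : dA.contains k = false := by rw [← hk]; exact hc
        simp [omaxFrom, hcA]
      · rw [if_neg hc, ih]
        have hcA : dA.contains k = true := by
          rw [← hk]; exact eq_true_of_ne_false hc
        have h1 : (dA.insert t.2 (max (dA.getD t.2 0) t.1)).contains k = true := by
          simp [hk]
        have h2 : (dA.insert t.2 (max (dA.getD t.2 0) t.1)).getD k 0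
            = max (dA.getD k 0) t.1 := by
          rw [PySem.Dict.getD_insert]; simp [hk]
        rw [if_pos h1, h2, if_pos hcA]
        simp [omaxFrom]
    · have hfilter : (t :: l).filter (fun t => t.2 == k) = l.filter (fun t => t.2 == k) := by
        simp [hk]
      rw [hfilter]
      have hins : ∀ v : Int,
          ((dA.insert t.2 v).contains k = dA.contains k) ∧
          ((dA.insert t.2 v).getD k 0 = dA.getD k 0) := by
        intro v
        constructor
        · rw [PySem.Dict.contains_insert]
          have : (k == t.2) = false := by
            simp only [beq_eq_false_iff_ne, ne_eq]
            exact fun h => hk h.symm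
          rw [this, Bool.false_or]
        · rw [PySem.Dict.getD_insert, if_neg (fun h => hk h.symm)]
      by_cases hc : dA.contains t.2 = false
      · rw [if_pos hc, ih, (hins t.1).1, (hins t.1).2]
      · rw [if_neg hc, ih, (hins _).1, (hins _).2]

-- ===== VERDICT (by name: the statement is the Claim_ definition above) =====
theorem filter_tuples_spec : Claim_equal_filter_tuples := by
  intro l _
  unfold Spec_filter_tuples filter_tuples filter_tuples_alt
  have hkeysA :
      (l.foldl (fun d t =>
          if d.contains t.2 = false then d.insert t.2 t.1
          else d.insert t.2 (max (d.getD t.2 0) t.1))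
        (PySem.Dict.empty : PySem.Dict Int Int)).keys
        = PySem.Set.update [] (l.map Prod.snd) := by
    rw [stepA_eq]
    rw [PySem.Dict.keys_foldl_insert_key l Prod.snd
      (fun d t => if d.contains t.2 = false then t.1 else max (d.getD t.2 0) t.1)]
    simp
  have hndA :
      (l.foldl (fun d t =>
          if d.contains t.2 = false then d.insert t.2 t.1
          else d.insert t.2 (max (d.getD t.2 0) t.1))
        (PySem.Dict.empty : PySem.Dict Int Int)).keys.Nodup := by
    rw [stepA_eq]
    exact PySem.Dict.nodup_keys_foldl_insert_key l Prod.snd _ _ (by simp)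
  have hkeysB :
      (l.foldl (fun s t => PySem.Set.add s t.2) (PySem.Set.empty : PySem.Set Int))
        = PySem.Set.update [] (l.map Prod.snd) := by
    rw [PySem.Set.update, List.foldl_map]
    rfl
  rw [PySem.Dict.items_eq_map_keys _ hndA 0]
  rw [hkeysA, hkeysB, List.map_map]
  apply List.map_congr_left
  intro k hk
  have hmem : k ∈ l.map Prod.snd := by
    simpa [PySem.Set.mem_update] using hk
  have hne : (l.filter (fun t => t.2 == k)).map Prod.fst ≠ [] := by
    obtain ⟨t, ht, hts⟩ := List.mem_map.mp hmem
    intro hnil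
    have : t ∈ l.filter (fun t => t.2 == k) := by
      rw [List.mem_filter]; exact ⟨ht, by simp [hts]⟩
    rw [List.map_eq_nil_iff.mp hnil] at this
    exact absurd this (List.not_mem_nil)
  simp only [Function.comp_apply]
  rw [loopA_getD]
  simp only [PySem.Dict.contains_empty]
  cases hvs : (l.filter (fun t => t.2 == k)).map Prod.fst with
  | nil => exact absurd hvs hne
  | cons v vs =>
    rw [PySem.List.maxD, PySem.List.max?_id_cons]
    simp [omaxFrom]
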